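-- pv_equiv track=rewrite | github.com/liamcloss/X002 | trading_bot/yolo.py | _previous_ledger_ticker
-- ===== SOURCE A (Python) =====
-- from typing import Any
--
-- def _normalize_str(value: Any) -> str | None:
--     if value is None:
--         return None
--     text = str(value).strip()
--     return text or None
--
-- def _previous_ledger_ticker(ledger: list[dict[str, Any]]) -> str | None:
--     if len(ledger) < 2:
--         return None
--     for entry in reversed(ledger[:-1]):
--         ticker = _normalize_str(entry.get("ticker"))
--         if ticker:
--             return ticker
--     return None
-- ===== SOURCE B (Python) =====
-- def _normalize_str(value):
--     if value is None:
--         return None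
--     text = str(value).strip()
--     return text or None
--
-- def _previous_ledger_ticker(ledger):
--     if len(ledger) < 2:
--         return None
--     result = None
--     for entry in ledger[:-1]:
--         ticker = _normalize_str(entry.get("ticker"))
--         if ticker:
--             result = ticker
--     return result
-- ===== Notes on version B (the rewrite author's own statement) =====
-- stated objective: alternative
-- what changed: Backward early-return scan over reversed(ledger[:-1]) replaced by a forward last-wins accumulation over ledger[:-1] with a result variable.
import Mathlib
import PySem

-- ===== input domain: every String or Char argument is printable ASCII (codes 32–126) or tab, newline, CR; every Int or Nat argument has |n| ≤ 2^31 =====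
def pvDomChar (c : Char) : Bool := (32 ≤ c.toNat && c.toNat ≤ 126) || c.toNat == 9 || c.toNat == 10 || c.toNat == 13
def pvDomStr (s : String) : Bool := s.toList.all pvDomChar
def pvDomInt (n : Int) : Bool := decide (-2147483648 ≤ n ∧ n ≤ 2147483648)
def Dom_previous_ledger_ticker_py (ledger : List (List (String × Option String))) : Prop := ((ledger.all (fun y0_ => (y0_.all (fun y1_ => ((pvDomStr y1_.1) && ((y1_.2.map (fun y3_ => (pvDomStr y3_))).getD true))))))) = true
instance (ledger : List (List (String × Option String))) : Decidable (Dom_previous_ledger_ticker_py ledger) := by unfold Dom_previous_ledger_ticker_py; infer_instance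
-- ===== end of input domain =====

-- ===== PORT A =====
-- B differs only in traversal: A scans reversed(ledger[:-1]) with early return; B folds forward last-wins.
def pvNormalize (v : Option String) : Option String :=
  match v with
  | none => none
  | some s =>
    let text := PySem.Str.strip s
    if text = "" then none else some text

def pvGetTicker (entry : List (String × Option String)) : Option String :=
  match entry.find? (fun p => p.1 == "ticker") with
  | some p => p.2
  | none => none

def pvScanA : List (List (String × Option String)) → Option String
  | [] => none
  | e :: rest =>
    match pvNormalize (pvGetTicker e) with
    | some t => some t
    | none => pvScanA rest

def previous_ledger_ticker_py (ledger : List (List (String × Option String))) : Option String :=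
  if ledger.length < 2 then none
  else pvScanA ledger.dropLast.reverse

-- ===== PORT B =====
def previous_ledger_ticker_py_alt (ledger : List (List (String × Option String))) : Option String :=
  if ledger.length < 2 then none
  else ledger.dropLast.foldl
    (fun acc e =>
      match pvNormalize (pvGetTicker e) with
      | some t => some t
      | none => acc) none

-- ===== PRECONDITION & SPEC =====
def Spec_previous_ledger_ticker_py (ledger : List (List (String × Option String))) (out : Option String) : Prop := out = previous_ledger_ticker_py_alt ledger
instance (ledger : List (List (String × Option String))) (out : Option String) : Decidable (Spec_previous_ledger_ticker_py ledger out) := by unfold Spec_previous_ledger_ticker_py; infer_instance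

-- ===== CLAIM (what is proved, stated in full; the proofs are below) =====
def Claim_equal_previous_ledger_ticker_py : Prop := ∀ (ledger : List (List (String × Option String))), Dom_previous_ledger_ticker_py ledger → Spec_previous_ledger_ticker_py ledger (previous_ledger_ticker_py ledger)

-- ===== LEMMAS AND PROOFS =====
theorem pvScanA_append (xs ys : List (List (String × Option String))) :
    pvScanA (xs ++ ys) = match pvScanA xs with
      | some t => some t
      | none => pvScanA ys := by
  induction xs with
  | nil => simp [pvScanA]
  | cons e r ih =>
    simp only [List.cons_append, pvScanA, ih]
    cases pvNormalize (pvGetTicker e) <;> simp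

theorem pvFold_eq_scan (l : List (List (String × Option String))) (acc : Option String) :
    l.foldl (fun acc e =>
      match pvNormalize (pvGetTicker e) with
      | some t => some t
      | none => acc) acc
    = match pvScanA l.reverse with
      | some t => some t
      | none => acc := by
  induction l generalizing acc with
  | nil => simp [pvScanA]
  | cons e r ih =>
    simp only [List.foldl_cons, List.reverse_cons, ih, pvScanA_append, pvScanA]
    cases pvScanA r.reverse <;> cases pvNormalize (pvGetTicker e) <;> simp

-- ===== VERDICT (by name: the statement is the Claim_ definition above) =====
theorem previous_ledger_ticker_py_spec : Claim_equal_previous_ledger_ticker_py := by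
  intro ledger _
  unfold Spec_previous_ledger_ticker_py previous_ledger_ticker_py previous_ledger_ticker_py_alt
  split
  · rfl
  · rw [pvFold_eq_scan]
    cases pvScanA ledger.dropLast.reverse <;> rfl
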